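-- pv_equiv track=rewrite | github.com/Arrgentum/python_lection_tasks | lection5/AsciliGlass.py | makestr
-- ===== SOURCE A (Python) =====
-- def makestr(b):
--     a = ["#", "#", "*", "."]
--     i = 1
--     while i < b[4]:
--         if i < b[0]:
--             a[0] += "#"
--         else:
--             a[0] += "."
--         a[1] += "."
--         a[2] += "*"
--         a[3] += "."
--         i += 1
--     return a
-- ===== SOURCE B (Python) =====
-- def makestr(b):
--     cnt = max(0, b[4] - 1)
--     hashes = max(0, min(b[4], b[0]) - 1)
--     return ["#" * (1 + hashes) + "." * (cnt - hashes),
--             "#" + "." * cnt,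
--             "*" + "*" * cnt,
--             "." + "." * cnt]
-- ===== Notes on version B (the rewrite author's own statement) =====
-- stated objective: simpler
-- what changed: Replaces the character-by-character while loop with closed-form counts (cnt, hashes) and string multiplication; no loop at all.
import Mathlib
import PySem

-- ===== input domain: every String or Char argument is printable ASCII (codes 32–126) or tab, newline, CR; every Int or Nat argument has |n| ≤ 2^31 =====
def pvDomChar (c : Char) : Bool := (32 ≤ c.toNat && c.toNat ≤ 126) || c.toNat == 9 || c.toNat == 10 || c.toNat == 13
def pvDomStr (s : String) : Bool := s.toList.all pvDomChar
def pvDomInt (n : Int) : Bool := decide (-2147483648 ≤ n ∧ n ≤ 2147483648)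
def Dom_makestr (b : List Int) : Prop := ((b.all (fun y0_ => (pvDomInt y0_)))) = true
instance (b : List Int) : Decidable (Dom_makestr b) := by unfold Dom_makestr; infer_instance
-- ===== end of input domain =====

-- ===== PORT A =====
-- B replaces A's character-by-character while loop with closed-form counts and string repetition (objective: simpler).
-- A's while loop: i runs from its current value up to b4 (exclusive), appending one char to each of the four strings per step
def aWhileLoop (b0 b4 : Int) (i : Int) (a0 a1 a2 a3 : String) : List String :=
  if i < b4 then
    aWhileLoop b0 b4 (i + 1)
      (a0 ++ (if i < b0 then "#" else "."))
      (a1 ++ ".") (a2 ++ "*") (a3 ++ ".")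
  else
    [a0, a1, a2, a3]
termination_by (b4 - i).toNat
decreasing_by omega

def makestr (b : List Int) : List String :=
  match PySem.List.pyGet? b 0, PySem.List.pyGet? b 4 with
  | some b0, some b4 => aWhileLoop b0 b4 1 "#" "#" "*" "."
  | _, _ => []   -- unreachable under Pre_makestr (IndexError in Python)

-- ===== PORT B =====
def makestr_alt (b : List Int) : List String :=
  (((PySem.List.pyGet? b 0).bind fun b0 =>
    (PySem.List.pyGet? b 4).map fun b4 =>
      let cnt : Int := max 0 (b4 - 1)
      let hashes : Int := max 0 (min b4 b0 - 1)
      [ String.ofList (List.replicate (1 + hashes).toNat '#') ++ String.ofList (List.replicate (cnt - hashes).toNat '.'),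
        "#" ++ String.ofList (List.replicate cnt.toNat '.'),
        "*" ++ String.ofList (List.replicate cnt.toNat '*'),
        "." ++ String.ofList (List.replicate cnt.toNat '.') ]) : Option (List String)).getD []
  -- getD [] is unreachable under Pre_makestr (IndexError in Python)

-- ===== PRECONDITION & SPEC =====
-- Pre_ excludes lists shorter than 5 elements, on which A raises IndexError (b[4]); B raises there too.
def Pre_makestr (b : List Int) : Prop := 5 ≤ b.length
instance (b : List Int) : Decidable (Pre_makestr b) := by unfold Pre_makestr; infer_instance
def pvWitness_makestr : List Int := [3, 0, 0, 0, 6]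
def Spec_makestr (b : List Int) (out : List String) : Prop := out = makestr_alt b
instance (b : List Int) (out : List String) : Decidable (Spec_makestr b out) := by unfold Spec_makestr; infer_instance

-- ===== CLAIM (what is proved, stated in full; the proofs are below) =====
def Claim_equal_makestr : Prop := ∀ (b : List Int), Dom_makestr b → Pre_makestr b → Spec_makestr b (makestr b)

-- ===== LEMMAS AND PROOFS =====

-- closed form of the loop: with n = (b4-i).toNat remaining iterations and h = min (b0-i).toNat n
-- hash-appends, the loop appends h '#'s then n-h '.'s to a0, and n of the fixed char to each of a1 a2 a3
theorem aWhileLoop_spec (b0 b4 i : Int) (a0 a1 a2 a3 : String) :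
    aWhileLoop b0 b4 i a0 a1 a2 a3 =
      [ a0 ++ String.ofList (List.replicate (min (b0 - i).toNat (b4 - i).toNat) '#'
              ++ List.replicate ((b4 - i).toNat - min (b0 - i).toNat (b4 - i).toNat) '.'),
        a1 ++ String.ofList (List.replicate (b4 - i).toNat '.'),
        a2 ++ String.ofList (List.replicate (b4 - i).toNat '*'),
        a3 ++ String.ofList (List.replicate (b4 - i).toNat '.') ] := by
  by_cases h : i < b4
  · rw [aWhileLoop, if_pos h, aWhileLoop_spec b0 b4 (i + 1)]
    have hn : (b4 - i).toNat = (b4 - (i + 1)).toNat + 1 := by omega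
    by_cases hb : i < b0
    · have hh : min (b0 - i).toNat (b4 - i).toNat
          = min (b0 - (i + 1)).toNat (b4 - (i + 1)).toNat + 1 := by omega
      have hd : (b4 - i).toNat - min (b0 - i).toNat (b4 - i).toNat
          = (b4 - (i + 1)).toNat - min (b0 - (i + 1)).toNat (b4 - (i + 1)).toNat := by omega
      rw [if_pos hb, hd, hh, hn]
      simp only [List.cons.injEq, and_true]
      refine ⟨?_, ?_, ?_, ?_⟩ <;>
        · rw [← String.toList_inj]
          simp [List.replicate_succ]
    · have hh0 : min (b0 - i).toNat (b4 - i).toNat = 0 := by omega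
      have hh1 : min (b0 - (i + 1)).toNat (b4 - (i + 1)).toNat = 0 := by omega
      rw [if_neg hb, hh0, hh1, hn]
      simp only [Nat.sub_zero, List.cons.injEq, and_true]
      refine ⟨?_, ?_, ?_, ?_⟩ <;>
        · rw [← String.toList_inj]
          simp [List.replicate_succ]
  · rw [aWhileLoop, if_neg h]
    have hz : (b4 - i).toNat = 0 := by omega
    simp [hz]
termination_by (b4 - i).toNat
decreasing_by omega

-- ===== VERDICT (by name: the statement is the Claim_ definition above) =====
theorem makestr_spec : Claim_equal_makestr := by
  intro b _ hpre
  obtain _ | ⟨x0, _ | ⟨x1, _ | ⟨x2, _ | ⟨x3, _ | ⟨x4, rest⟩⟩⟩⟩⟩ := b <;>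
    first
    | (exfalso; revert hpre; unfold Pre_makestr; simp; done)
    | skip
  unfold Spec_makestr makestr makestr_alt
  have h0 : PySem.List.pyGet? (x0 :: x1 :: x2 :: x3 :: x4 :: rest) 0 = some x0 := by
    simp [PySem.List.pyGet?, PySem.List.pyIdx?,
      show (0:Int) ≤ (rest.length:Int) + 1 + 1 + 1 + 1 by omega]
  have h4 : PySem.List.pyGet? (x0 :: x1 :: x2 :: x3 :: x4 :: rest) 4 = some x4 := by
    simp [PySem.List.pyGet?, PySem.List.pyIdx?,
      show (4:Int) ≤ (rest.length:Int) + 1 + 1 + 1 + 1 by omega]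
  rw [h0, h4]
  simp only [Option.bind_some, Option.map_some, Option.getD_some]
  simp only [aWhileLoop_spec]
  have e1 : (1 + max 0 (min x4 x0 - 1)).toNat
      = min (x0 - 1).toNat (x4 - 1).toNat + 1 := by omega
  have e2 : (max 0 (x4 - 1) - max 0 (min x4 x0 - 1)).toNat
      = (x4 - 1).toNat - min (x0 - 1).toNat (x4 - 1).toNat := by omega
  have e3 : (max 0 (x4 - 1)).toNat = (x4 - 1).toNat := by omega
  simp only [e1, e2, e3, List.cons.injEq, and_true, and_self]
  rw [← String.toList_inj]
  simp [List.replicate_succ]
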